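-- pv_equiv track=rewrite | github.com/eollich/Philly-Codefest-2023 | scheduler/python_scripts/ics/ics_control.py | find_time_slot
-- ===== SOURCE A (Python) =====
-- weekends = [4,5,11,12,18,19,25,26]
--
-- def get_maximum_contiguous(hour_list):
--     if len(hour_list) == 1:
--         return 1
--     else:
--         max_count = 1
--         curr_count = 1
--         for i in range(len(hour_list)-1):
--             if hour_list[i+1] - hour_list[i] == 1: # Contiguous
--                 curr_count += 1
--             else:
--                 max_count = max(max_count, curr_count)
--                 curr_count = 1
--         return max(max_count, curr_count) # Final update
--
-- def get_time_slot(list_of_time_slots, hours_needed):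
--     new_arr = [list_of_time_slots[0]]
--     if hours_needed == 1:
--         return new_arr
--     for i in range(len(list_of_time_slots)-1):
--         if list_of_time_slots[i+1] - list_of_time_slots[i] == 1:
--             new_arr.append(list_of_time_slots[i+1])
--             if len(new_arr) == hours_needed:
--                 return new_arr
--         else:
--             new_arr = [list_of_time_slots[i+1]]
--     return new_arr
--
-- def find_time_slot(today, offset, group_type, hours_needed, available_time_list):
--     ret = []
--     end = min(31, today+offset)
--     for day in range(today, end+1):
--         if day in weekends:
--             continue
--         max_time = get_maximum_contiguous(available_time_list[group_type][day])
--         if hours_needed <= max_time: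
--             ret.append({day : get_time_slot(available_time_list[group_type][day], hours_needed)})
--     return ret
-- ===== SOURCE B (Python) =====
-- weekends = [4, 5, 11, 12, 18, 19, 25, 26]
--
--
-- def _first_slot(hours, need):
--     """One scan: grow the current contiguous run; return it as soon as it reaches `need` hours."""
--     run = []
--     for h in hours:
--         if run and h - run[-1] == 1:
--             run.append(h)
--         else:
--             run = [h]
--         if len(run) == need:
--             return run
--     return None
--
--
-- def find_time_slot(today, offset, group_type, hours_needed, available_time_list):
--     ret = []
--     for day in range(today, min(31, today + offset) + 1):
--         if day in weekends:
--             continue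
--         slot = _first_slot(available_time_list[group_type][day], hours_needed)
--         if slot is not None:
--             ret.append({day: slot})
--     return ret
-- ===== Notes on version B (the rewrite author's own statement) =====
-- stated objective: alternative
-- what changed: Per day, A's two separate index-loop helpers (get_maximum_contiguous to test feasibility, then get_time_slot to rebuild the slot) are replaced by ONE scan that grows the current contiguous run and returns it the moment it reaches hours_needed, appending the day only when such a slot was found.
-- intended difference: For hours_needed <= 0 with at least one non-weekend day in range, A appends for every such day its LAST contiguous run (get_time_slot's fall-through after the length check can never fire), while B finds no slot of the requested length and returns []; on this unspecified corner B's empty answer is the natural outcome of its scan rather than an accidental leftover run. — e.g. on find_time_slot(1, 0, "a", 0, [("a", [(1, [3])])]): A returns [[(1, [3])]], B returns []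
import Mathlib
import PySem

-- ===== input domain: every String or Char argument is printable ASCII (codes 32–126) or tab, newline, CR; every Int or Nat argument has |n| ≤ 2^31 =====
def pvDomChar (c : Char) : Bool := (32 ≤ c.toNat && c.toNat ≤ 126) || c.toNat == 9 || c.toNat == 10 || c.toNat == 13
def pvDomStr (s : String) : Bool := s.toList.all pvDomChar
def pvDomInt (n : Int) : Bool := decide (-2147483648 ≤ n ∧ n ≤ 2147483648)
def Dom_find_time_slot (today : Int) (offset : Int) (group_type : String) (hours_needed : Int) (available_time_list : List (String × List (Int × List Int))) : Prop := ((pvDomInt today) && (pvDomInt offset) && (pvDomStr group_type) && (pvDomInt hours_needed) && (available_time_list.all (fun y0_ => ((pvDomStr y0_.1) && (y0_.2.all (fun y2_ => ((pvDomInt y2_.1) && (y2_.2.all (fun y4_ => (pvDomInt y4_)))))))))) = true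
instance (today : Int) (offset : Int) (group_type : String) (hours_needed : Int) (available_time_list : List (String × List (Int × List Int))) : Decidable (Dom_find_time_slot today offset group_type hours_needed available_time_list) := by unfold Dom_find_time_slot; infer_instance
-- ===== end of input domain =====

-- B replaces A's two index-loop helper passes per day (feasibility test, then slot rebuild) by one
-- early-exiting scan over the hour list (objective: alternative; see D_ for the hours_needed ≤ 0 corner).

-- ===== PORT A =====
def weekends : List Int := [4, 5, 11, 12, 18, 19, 25, 26]

-- 'for i in range(len(hour_list)-1)' accesses indices 0 ≤ i < i+1 < len, so List.getD is exact there.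
def get_maximum_contiguous (hour_list : List Int) : Int :=
  if hour_list.length = 1 then 1
  else
    let p := (List.range (hour_list.length - 1)).foldl
      (fun (s : Int × Int) i =>
        if hour_list.getD (i + 1) 0 - hour_list.getD i 0 = 1 then (s.1, s.2 + 1)
        else (max s.1 s.2, 1)) (1, 1)
    max p.1 p.2

-- the 'for i in range(len(l)-1)' loop of get_time_slot, with its early returns; indices in range, getD exact
def gts_loop (l : List Int) (hn : Int) (na : List Int) (i : Nat) : List Int :=
  if h : i + 1 < l.length then
    if l.getD (i + 1) 0 - l.getD i 0 = 1 then
      let na' := na ++ [l.getD (i + 1) 0]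
      if (na'.length : Int) = hn then na' else gts_loop l hn na' (i + 1)
    else gts_loop l hn [l.getD (i + 1) 0] (i + 1)
  else na
termination_by l.length - i

-- list_of_time_slots[0] raises IndexError on []; Pre_ guarantees nonemptiness at every call site
def get_time_slot (list_of_time_slots : List Int) (hours_needed : Int) : List Int :=
  let new_arr := [PySem.List.pyGetD list_of_time_slots 0 0]
  if hours_needed = 1 then new_arr
  else gts_loop list_of_time_slots hours_needed new_arr 0

def find_time_slot (today : Int) (offset : Int) (group_type : String) (hours_needed : Int) (available_time_list : List (String × List (Int × List Int))) : List (List (Int × List Int)) :=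
  let e := min 31 (today + offset)
  (PySem.List.pyRange today (e + 1) 1).foldl
    (fun ret day =>
      if weekends.contains day then ret
      else
        let hl := PySem.Dict.getD (PySem.Dict.mk (PySem.Dict.getD (PySem.Dict.mk available_time_list) group_type [])) day []
        if hours_needed ≤ get_maximum_contiguous hl then
          ret ++ [[(day, get_time_slot hl hours_needed)]]
        else ret) []

-- ===== PORT B =====
-- Source B's _first_slot: grow the current contiguous run; return it as soon as it reaches `need` hours
def slot_for (need : Int) : List Int → List Int → Option (List Int)
  | _, [] => none
  | run, h :: t =>
    let run' := match run.getLast? with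
      | some last => if h - last = 1 then run ++ [h] else [h]
      | none => [h]
    if (run'.length : Int) = need then some run' else slot_for need run' t

def find_time_slot_alt (today : Int) (offset : Int) (group_type : String) (hours_needed : Int) (available_time_list : List (String × List (Int × List Int))) : List (List (Int × List Int)) :=
  (PySem.List.pyRange today (min 31 (today + offset) + 1) 1).foldl
    (fun ret day =>
      if weekends.contains day then ret
      else
        match slot_for hours_needed [] (PySem.Dict.getD (PySem.Dict.mk (PySem.Dict.getD (PySem.Dict.mk available_time_list) group_type [])) day []) with
        | some slot => ret ++ [[(day, slot)]]
        | none => ret) []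

-- ===== PRECONDITION & SPEC =====
-- Pre_ excludes exactly the inputs where Python A raises: a processed (in-range, non-weekend) day whose
-- group_type/day dict lookup is missing (KeyError), or whose hour list is empty while hours_needed ≤ 1
-- (IndexError from list_of_time_slots[0]).
def Pre_find_time_slot (today : Int) (offset : Int) (group_type : String) (hours_needed : Int) (available_time_list : List (String × List (Int × List Int))) : Prop :=
  ∀ day ∈ PySem.List.pyRange today (min 31 (today + offset) + 1) 1,
    weekends.contains day = false →
      (PySem.Dict.contains (PySem.Dict.mk available_time_list) group_type = true ∧
       PySem.Dict.contains (PySem.Dict.mk (PySem.Dict.getD (PySem.Dict.mk available_time_list) group_type [])) day = true ∧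
       (hours_needed ≤ 1 →
         PySem.Dict.getD (PySem.Dict.mk (PySem.Dict.getD (PySem.Dict.mk available_time_list) group_type [])) day [] ≠ []))
instance (today : Int) (offset : Int) (group_type : String) (hours_needed : Int) (available_time_list : List (String × List (Int × List Int))) : Decidable (Pre_find_time_slot today offset group_type hours_needed available_time_list) := by unfold Pre_find_time_slot; infer_instance

def pvWitness_find_time_slot : Int × Int × String × Int × (List (String × List (Int × List Int))) :=
  (1, 1, "a", 2, [("a", [(1, [1, 2]), (2, [5])])])

-- For hours_needed ≤ 0 with at least one non-weekend day in range, A appends for every such day its LAST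
-- contiguous run (get_time_slot's fall-through: the length check can never fire), while B finds no slot of
-- the requested length and returns []; on this unspecified corner B's empty answer is the natural outcome
-- of its scan rather than an accidental leftover run.
def D_find_time_slot (today : Int) (offset : Int) (group_type : String) (hours_needed : Int) (available_time_list : List (String × List (Int × List Int))) : Prop :=
  hours_needed ≤ 0 ∧
  ∃ day ∈ PySem.List.pyRange today (min 31 (today + offset) + 1) 1, weekends.contains day = false
instance (today : Int) (offset : Int) (group_type : String) (hours_needed : Int) (available_time_list : List (String × List (Int × List Int))) : Decidable (D_find_time_slot today offset group_type hours_needed available_time_list) := by unfold D_find_time_slot; infer_instance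

def Spec_find_time_slot (today : Int) (offset : Int) (group_type : String) (hours_needed : Int) (available_time_list : List (String × List (Int × List Int))) (out : List (List (Int × List Int))) : Prop := ¬ D_find_time_slot today offset group_type hours_needed available_time_list → out = find_time_slot_alt today offset group_type hours_needed available_time_list
instance (today : Int) (offset : Int) (group_type : String) (hours_needed : Int) (available_time_list : List (String × List (Int × List Int))) (out : List (List (Int × List Int))) : Decidable (Spec_find_time_slot today offset group_type hours_needed available_time_list out) := by unfold Spec_find_time_slot; infer_instance

def pvDiffWitness_find_time_slot : Int × Int × String × Int × (List (String × List (Int × List Int))) :=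
  (1, 0, "a", 0, [("a", [(1, [3])])])
def pvDiffWitnessOut_find_time_slot : (List (List (Int × List Int))) × (List (List (Int × List Int))) :=
  ([[(1, [3])]], [])

-- ===== CLAIM (what is proved, stated in full; the proofs are below) =====
def Claim_unchanged_find_time_slot : Prop := ∀ (today : Int) (offset : Int) (group_type : String) (hours_needed : Int) (available_time_list : List (String × List (Int × List Int))), Dom_find_time_slot today offset group_type hours_needed available_time_list → Pre_find_time_slot today offset group_type hours_needed available_time_list → Spec_find_time_slot today offset group_type hours_needed available_time_list (find_time_slot today offset group_type hours_needed available_time_list)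
def Claim_changed_find_time_slot : Prop := Dom_find_time_slot (pvDiffWitness_find_time_slot.1) (pvDiffWitness_find_time_slot.2.1) (pvDiffWitness_find_time_slot.2.2.1) (pvDiffWitness_find_time_slot.2.2.2.1) (pvDiffWitness_find_time_slot.2.2.2.2) ∧ Pre_find_time_slot (pvDiffWitness_find_time_slot.1) (pvDiffWitness_find_time_slot.2.1) (pvDiffWitness_find_time_slot.2.2.1) (pvDiffWitness_find_time_slot.2.2.2.1) (pvDiffWitness_find_time_slot.2.2.2.2) ∧ D_find_time_slot (pvDiffWitness_find_time_slot.1) (pvDiffWitness_find_time_slot.2.1) (pvDiffWitness_find_time_slot.2.2.1) (pvDiffWitness_find_time_slot.2.2.2.1) (pvDiffWitness_find_time_slot.2.2.2.2) ∧ find_time_slot (pvDiffWitness_find_time_slot.1) (pvDiffWitness_find_time_slot.2.1) (pvDiffWitness_find_time_slot.2.2.1) (pvDiffWitness_find_time_slot.2.2.2.1) (pvDiffWitness_find_time_slot.2.2.2.2) = pvDiffWitnessOut_find_time_slot.1 ∧ find_time_slot_alt (pvDiffWitness_find_time_slot.1) (pvDiffWitness_find_time_slot.2.1) (pvDiffWitness_find_time_slot.2.2.1)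 (pvDiffWitness_find_time_slot.2.2.2.1) (pvDiffWitness_find_time_slot.2.2.2.2) = pvDiffWitnessOut_find_time_slot.2 ∧ pvDiffWitnessOut_find_time_slot.1 ≠ pvDiffWitnessOut_find_time_slot.2
def Claim_exact_find_time_slot : Prop := ∀ (today : Int) (offset : Int) (group_type : String) (hours_needed : Int) (available_time_list : List (String × List (Int × List Int))), Dom_find_time_slot today offset group_type hours_needed available_time_list → Pre_find_time_slot today offset group_type hours_needed available_time_list → D_find_time_slot today offset group_type hours_needed available_time_list → find_time_slot today offset group_type hours_needed available_time_list ≠ find_time_slot_alt today offset group_type hours_needed available_time_list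
-- ===== LEMMAS AND PROOFS =====

-- proof-side structural run decomposition and its companions
def runsS : List Int → List (List Int)
  | [] => []
  | [a] => [[a]]
  | a :: b :: t =>
    if b - a = 1 then
      match runsS (b :: t) with
      | r :: rs => (a :: r) :: rs
      | [] => [[a]]
    else [a] :: runsS (b :: t)

def adj : List Int → List Int
  | [] => []
  | [_] => []
  | a :: b :: t => (b - a) :: adj (b :: t)

def stepA (s : Int × Int) (d : Int) : Int × Int :=
  if d = 1 then (s.1, s.2 + 1) else (max s.1 s.2, 1)

def maxLenI (rs : List (List Int)) : Int := rs.foldr (fun r m => max (r.length : Int) m) 1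

def ffA (hn : Int) : List (List Int) → List Int
  | [] => []
  | [r] => if hn ≤ (r.length : Int) then r.take hn.toNat else r
  | r :: r2 :: rs => if hn ≤ (r.length : Int) then r.take hn.toNat else ffA hn (r2 :: rs)

def gtsS (hn : Int) : List Int → List Int → List Int
  | na, a :: b :: t =>
    if b - a = 1 then
      let na' := na ++ [b]
      if (na'.length : Int) = hn then na' else gtsS hn na' (b :: t)
    else gtsS hn [b] (b :: t)
  | na, _ => na

def consRun : List Int → List Int → List (List Int)
  | cur, [] => [cur]
  | cur, b :: t => if b - ((cur.getLast?).getD 0) = 1 then consRun (cur ++ [b]) t else cur :: consRun [b] t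

theorem runsS_cons (a : Int) (t : List Int) : ∃ rt rs, runsS (a :: t) = (a :: rt) :: rs := by
  induction t generalizing a with
  | nil => exact ⟨[], [], rfl⟩
  | cons b t' ih =>
    obtain ⟨rt, rs, h⟩ := ih b
    by_cases hc : b - a = 1
    · exact ⟨b :: rt, rs, by simp [runsS, hc, h]⟩
    · exact ⟨[], runsS (b :: t'), by simp [runsS, hc]⟩

theorem adj_eq_map_range (l : List Int) :
    (List.range (l.length - 1)).map (fun i => l.getD (i + 1) 0 - l.getD i 0) = adj l := by
  induction l using adj.induct with
  | case1 => simp [adj]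
  | case2 a => simp [adj]
  | case3 a b t ih =>
    simp only [List.length_cons, Nat.add_sub_cancel, List.range_succ_eq_map, List.map_cons,
      List.map_map]
    refine List.cons_eq_cons.mpr ⟨by simp, ?_⟩
    rw [← ih]
    simp only [List.length_cons, Nat.add_sub_cancel]
    apply List.map_congr_left
    intro i _
    simp [Function.comp]

theorem gmc_eq_fold (l : List Int) :
    get_maximum_contiguous l = (let p := (adj l).foldl stepA (1, 1); max p.1 p.2) := by
  have hf : (List.range (l.length - 1)).foldl
      (fun (s : Int × Int) i =>
        if l.getD (i + 1) 0 - l.getD i 0 = 1 then (s.1, s.2 + 1) else (max s.1 s.2, 1)) (1, 1)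
      = (adj l).foldl stepA (1, 1) := by
    rw [← adj_eq_map_range, List.foldl_map]
    simp [stepA]
  by_cases hlen : l.length = 1
  · obtain ⟨a, rfl⟩ := List.length_eq_one_iff.mp hlen
    simp [get_maximum_contiguous, adj]
  · simp only [get_maximum_contiguous, hlen, if_false, hf]

theorem gmc_gen (l : List Int) (r : List Int) (rs : List (List Int)) (mc cc : Int)
    (h1 : 1 ≤ mc) (h2 : 1 ≤ cc) (hr : runsS l = r :: rs) :
    (let p := (adj l).foldl stepA (mc, cc); max p.1 p.2)
      = max (max mc (cc + (r.length : Int) - 1)) (maxLenI rs) := by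
  induction l using runsS.induct generalizing r rs mc cc with
  | case1 => simp [runsS] at hr
  | case2 a =>
    simp only [runsS, List.cons.injEq] at hr
    obtain ⟨rfl, rfl⟩ := hr
    simp only [adj, List.foldl_nil, maxLenI, List.foldr_nil, List.length_cons, List.length_nil]
    omega
  | case3 a b t hc r' rs' hbt ih =>
    simp only [runsS, hc, if_true, hbt, List.cons.injEq] at hr
    obtain ⟨rfl, rfl⟩ := hr
    have := ih r' rs' mc (cc + 1) h1 (by omega) hbt
    simp only [adj, List.foldl_cons] at *
    have hs : stepA (mc, cc) (b - a) = (mc, cc + 1) := by simp [stepA, hc]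
    rw [hs, this]
    simp only [List.length_cons]
    push_cast
    omega
  | case4 a b t hc hnil ih =>
    obtain ⟨rt, rs', hbt⟩ := runsS_cons b t
    rw [hbt] at hnil
    exact absurd hnil (by simp)
  | case5 a b t hc ih =>
    obtain ⟨rt, rs', hbt⟩ := runsS_cons b t
    simp only [runsS, hc, if_false, hbt, List.cons.injEq] at hr
    obtain ⟨rfl, rfl⟩ := hr
    have := ih (b :: rt) rs' (max mc cc) 1 (by omega) (by omega) hbt
    simp only [adj, List.foldl_cons] at *
    have hs : stepA (mc, cc) (b - a) = (max mc cc, 1) := by simp [stepA, hc]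
    rw [hs, this]
    simp only [maxLenI, List.foldr_cons, List.length_cons, List.length_nil]
    push_cast
    omega

theorem one_le_maxLenI (rs : List (List Int)) : 1 ≤ maxLenI rs := by
  induction rs with
  | nil => simp [maxLenI]
  | cons r rs ih => simp only [maxLenI, List.foldr_cons] at *; omega

theorem gmc_eq_maxLen (l : List Int) (hl : l ≠ []) :
    get_maximum_contiguous l = maxLenI (runsS l) := by
  obtain ⟨a, t, rfl⟩ := List.exists_cons_of_ne_nil hl
  obtain ⟨rt, rs, hr⟩ := runsS_cons a t
  rw [gmc_eq_fold, gmc_gen (a :: t) (a :: rt) rs 1 1 le_rfl le_rfl hr, hr]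
  have := one_le_maxLenI rs
  simp only [maxLenI, List.foldr_cons, List.length_cons] at *
  push_cast
  omega

theorem gmc_ge_one (l : List Int) : 1 ≤ get_maximum_contiguous l := by
  cases l with
  | nil => decide
  | cons a t =>
    rw [gmc_eq_maxLen (a :: t) (by simp)]
    exact one_le_maxLenI _

theorem gts_loop_eq_gtsS (l : List Int) (hn : Int) (na : List Int) (i : Nat) :
    gts_loop l hn na i = gtsS hn na (l.drop i) := by
  induction na, i using gts_loop.induct l hn with
  | case1 na i h hc na' hlen =>
    have hi : i < l.length := by omega
    have hd : l.drop i = l[i] :: l[i + 1] :: l.drop (i + 2) := by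
      rw [List.drop_eq_getElem_cons hi, List.drop_eq_getElem_cons h]
    have hga : l.getD i 0 = l[i] := l.getD_eq_getElem 0 hi
    have hgb : l.getD (i + 1) 0 = l[i + 1] := l.getD_eq_getElem 0 h
    have hl2 : (↑na.length + 1 : Int) = hn := by simpa [na'] using hlen
    have hc' : l[i + 1] - l[i] = 1 := by rwa [hga, hgb] at hc
    rw [gts_loop, hd]
    simp only [gtsS, hga, hgb]
    simp [h, hc', hl2]
  | case2 na i h hc na' hlen ih =>
    have hi : i < l.length := by omega
    have hd : l.drop i = l[i] :: l[i + 1] :: l.drop (i + 2) := by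
      rw [List.drop_eq_getElem_cons hi, List.drop_eq_getElem_cons h]
    have hd1 : l.drop (i + 1) = l[i + 1] :: l.drop (i + 2) := List.drop_eq_getElem_cons h
    have hga : l.getD i 0 = l[i] := l.getD_eq_getElem 0 hi
    have hgb : l.getD (i + 1) 0 = l[i + 1] := l.getD_eq_getElem 0 h
    have hl2 : ¬ (↑na.length + 1 : Int) = hn := by simpa [na'] using hlen
    have hc' : l[i + 1] - l[i] = 1 := by rwa [hga, hgb] at hc
    have ih' : gts_loop l hn (na ++ [l[i + 1]]) (i + 1) = gtsS hn (na ++ [l[i + 1]]) (l.drop (i + 1)) := by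
      simpa [na', List.getElem?_eq_getElem h] using ih
    rw [gts_loop, hd]
    simp only [gtsS, hga, hgb]
    simp [h, hc', hl2, ih']
  | case3 na i h hc ih =>
    have hi : i < l.length := by omega
    have hd : l.drop i = l[i] :: l[i + 1] :: l.drop (i + 2) := by
      rw [List.drop_eq_getElem_cons hi, List.drop_eq_getElem_cons h]
    have hga : l.getD i 0 = l[i] := l.getD_eq_getElem 0 hi
    have hgb : l.getD (i + 1) 0 = l[i + 1] := l.getD_eq_getElem 0 h
    have hc' : ¬ l[i + 1] - l[i] = 1 := by rwa [hga, hgb] at hc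
    have ih' : gts_loop l hn [l[i + 1]] (i + 1) = gtsS hn [l[i + 1]] (l.drop (i + 1)) := by
      simpa [List.getElem?_eq_getElem h] using ih
    rw [gts_loop, hd]
    simp only [gtsS, hga, hgb]
    simp [h, hc', ih']
  | case4 na i h =>
    rw [gts_loop]
    simp only [h, dif_neg, not_false_iff]
    have hlen : (l.drop i).length ≤ 1 := by
      simp only [List.length_drop]; omega
    match hdi : l.drop i with
    | [] => simp [gtsS]
    | [x] => simp [gtsS]
    | x :: y :: t => rw [hdi] at hlen; simp at hlen

theorem take_app_one (na : List Int) (x : Int) (xs : List Int) :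
    (na ++ x :: xs).take (na.length + 1) = na ++ [x] := by
  rw [List.take_append]
  simp

theorem gtsS_pos (hn : Int) (h2 : 2 ≤ hn) :
    ∀ (l : List Int) (r : List Int) (rs : List (List Int)) (na : List Int),
      runsS l = r :: rs → na ≠ [] → (na.length : Int) < hn →
      gtsS hn na l =
        if hn ≤ (na.length : Int) + (r.length : Int) - 1 then (na ++ r.drop 1).take hn.toNat
        else match rs with
             | [] => na ++ r.drop 1
             | _ :: _ => ffA hn rs := by
  intro l
  induction l using runsS.induct with
  | case1 => intro r rs na hr _ _; simp [runsS] at hr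
  | case2 a =>
    intro r rs na hr hna hlt
    simp only [runsS, List.cons.injEq] at hr
    obtain ⟨rfl, rfl⟩ := hr
    rw [if_neg (by simp; omega)]
    simp [gtsS]
  | case3 a b t hc r' rs' hbt ih =>
    intro r rs na hr hna hlt
    obtain ⟨rt, rs'', hbt2⟩ := runsS_cons b t
    rw [hbt2] at hbt
    obtain ⟨rfl, rfl⟩ := List.cons_eq_cons.mp hbt
    simp only [runsS, hc, if_true, hbt2, List.cons.injEq] at hr
    obtain ⟨rfl, rfl⟩ := hr
    by_cases hstop : (↑na.length + 1 : Int) = hn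
    · have hLHS : gtsS hn na (a :: b :: t) = na ++ [b] := by
        simp [gtsS, hc, hstop]
      have htn : hn.toNat = na.length + 1 := by omega
      rw [hLHS, if_pos (by simp; omega), htn]
      simp only [List.drop_succ_cons, List.drop_zero]
      rw [take_app_one]
    · have hLHS : gtsS hn na (a :: b :: t) = gtsS hn (na ++ [b]) (b :: t) := by
        simp [gtsS, hc, hstop]
      rw [hLHS, ih (b :: rt) rs'' (na ++ [b]) hbt2 (by simp) (by simp; omega)]
      simp only [List.drop_succ_cons, List.drop_zero, List.length_append, List.length_cons,
        List.length_nil]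
      cases rs'' with
      | nil => refine if_congr (by push_cast; omega) (by simp) (by simp)
      | cons r2 rs2 => refine if_congr (by push_cast; omega) (by simp) rfl
  | case4 a b t hc hnil ih =>
    obtain ⟨rt, rs', hbt⟩ := runsS_cons b t
    rw [hbt] at hnil
    exact absurd hnil (by simp)
  | case5 a b t hc ih =>
    intro r rs na hr hna hlt
    obtain ⟨rt, rs'', hbt2⟩ := runsS_cons b t
    simp only [runsS, hc, if_false, hbt2, List.cons.injEq] at hr
    obtain ⟨rfl, rfl⟩ := hr
    have hLHS : gtsS hn na (a :: b :: t) = gtsS hn [b] (b :: t) := by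
      simp [gtsS, hc]
    rw [if_neg (by simp; omega), hLHS, ih (b :: rt) rs'' [b] hbt2 (by simp) (by simp; omega)]
    simp only [List.drop_succ_cons, List.drop_zero, List.length_cons, List.length_nil,
      List.singleton_append]
    cases rs'' with
    | nil => simp only [ffA]; refine if_congr (by push_cast [List.length_cons]; omega) rfl rfl
    | cons r2 rs2 => simp only [ffA]; refine if_congr (by push_cast [List.length_cons]; omega) rfl rfl

theorem consRun_eq (t : List Int) :
    ∀ cur : List Int, cur ≠ [] →
      consRun cur t =
        match runsS t with
        | [] => [cur]
        | r :: rs => if ((r.head?).getD 0) - ((cur.getLast?).getD 0) = 1 then (cur ++ r) :: rs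
                     else cur :: r :: rs := by
  induction t using runsS.induct with
  | case1 => intro cur hcur; simp [consRun, runsS]
  | case2 b =>
    intro cur hcur
    simp only [consRun, runsS, List.head?_cons, Option.getD_some]
    by_cases hc : b - (cur.getLast?).getD 0 = 1
    · simp [hc]
    · simp [hc]
  | case3 b c t' hc r' rs' hbt ih =>
    intro cur hcur
    obtain ⟨rt, rs'', hbt2⟩ := runsS_cons c t'
    rw [hbt2] at hbt
    obtain ⟨rfl, rfl⟩ := List.cons_eq_cons.mp hbt
    have hrbc : runsS (b :: c :: t') = (b :: c :: rt) :: rs'' := by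
      simp [runsS, hc, hbt2]
    rw [hrbc]
    by_cases ho : b - (cur.getLast?).getD 0 = 1
    · rw [consRun, if_pos ho, ih (cur ++ [b]) (by simp), hbt2]
      simp [ho, hc]
    · rw [consRun, if_neg ho, ih [b] (by simp), hbt2]
      simp [ho, hc]
  | case4 b c t' hc hnil ih =>
    obtain ⟨rt, rs', hbt⟩ := runsS_cons c t'
    rw [hbt] at hnil
    exact absurd hnil (by simp)
  | case5 b c t' hc ih =>
    intro cur hcur
    obtain ⟨rt, rs'', hbt2⟩ := runsS_cons c t'
    have hrbc : runsS (b :: c :: t') = [b] :: (c :: rt) :: rs'' := by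
      simp [runsS, hc, hbt2]
    rw [hrbc]
    by_cases ho : b - (cur.getLast?).getD 0 = 1
    · rw [consRun, if_pos ho, ih (cur ++ [b]) (by simp), hbt2]
      simp [ho, hc]
    · rw [consRun, if_neg ho, ih [b] (by simp), hbt2]
      simp [ho, hc]

theorem consRun_single (a : Int) (t : List Int) : consRun [a] t = runsS (a :: t) := by
  rw [consRun_eq t [a] (by simp)]
  cases t with
  | nil => simp [runsS]
  | cons b t' =>
    obtain ⟨rt, rs, hbt⟩ := runsS_cons b t'
    rw [hbt]
    simp only [List.head?_cons, Option.getD_some, List.getLast?_singleton]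
    by_cases hc : b - a = 1
    · simp [runsS, hc, hbt]
    · simp [runsS, hc, hbt]

theorem consRun_head (t : List Int) : ∀ cur : List Int, ∃ ext rs, consRun cur t = (cur ++ ext) :: rs := by
  induction t with
  | nil => intro cur; exact ⟨[], [], by simp [consRun]⟩
  | cons b t' ih =>
    intro cur
    by_cases hc : b - ((cur.getLast?).getD 0) = 1
    · obtain ⟨ext, rs, h⟩ := ih (cur ++ [b])
      exact ⟨b :: ext, rs, by simp [consRun, hc, h]⟩
    · exact ⟨[], consRun [b] t', by simp [consRun, hc]⟩

theorem find?_some_ffA (hn : Int) (rs : List (List Int)) (r : List Int)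
    (h : rs.find? (fun r => decide (hn ≤ (r.length : Int))) = some r) :
    ffA hn rs = r.take hn.toNat := by
  induction rs with
  | nil => simp at h
  | cons r0 rest ih =>
    by_cases hp : hn ≤ (r0.length : Int)
    · have hr : r0 = r := by
        have := h
        simp [hp] at this
        exact this
      subst hr
      cases rest <;> simp [ffA, hp]
    · have hd : (decide (hn ≤ (r0.length : Int))) = false := decide_eq_false hp
      simp only [List.find?_cons, hd] at h
      cases rest with
      | nil => simp at h
      | cons r2 rs2 => simp only [ffA, if_neg hp]; exact ih h

theorem find?_isSome_iff_maxLen (hn : Int) (h2 : 2 ≤ hn) (rs : List (List Int)) :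
    (rs.find? (fun r => decide (hn ≤ (r.length : Int)))).isSome = true ↔ hn ≤ maxLenI rs := by
  induction rs with
  | nil =>
    simp only [List.find?_nil, Option.isSome_none, Bool.false_eq_true, false_iff, maxLenI,
      List.foldr_nil]
    omega
  | cons r0 rest ih =>
    by_cases hp : hn ≤ (r0.length : Int)
    · simp only [List.find?_cons, decide_eq_true hp, Option.isSome_some, true_iff, maxLenI,
        List.foldr_cons]
      simp only [maxLenI] at ih
      omega
    · have hd : (decide (hn ≤ (r0.length : Int))) = false := decide_eq_false hp
      simp only [List.find?_cons, hd, maxLenI, List.foldr_cons]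
      simp only [maxLenI] at ih
      rw [ih]
      omega

theorem get_time_slot_eq_ffA (hn : Int) (h2 : 2 ≤ hn) (a : Int) (t : List Int) :
    get_time_slot (a :: t) hn = ffA hn (runsS (a :: t)) := by
  obtain ⟨rt, rs, hr⟩ := runsS_cons a t
  have h1 : ¬ hn = 1 := by omega
  simp only [get_time_slot, PySem.List.pyGetD_zero_cons, h1, if_false]
  rw [gts_loop_eq_gtsS, List.drop_zero,
    gtsS_pos hn h2 (a :: t) (a :: rt) rs [a] hr (by simp) (by simp; omega), hr]
  simp only [List.drop_succ_cons, List.drop_zero, List.length_cons, List.length_nil,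
    List.singleton_append]
  cases rs with
  | nil => simp only [ffA]; refine if_congr (by push_cast [List.length_cons]; omega) rfl rfl
  | cons r2 rs2 => simp only [ffA]; refine if_congr (by push_cast [List.length_cons]; omega) rfl rfl

-- B-side: slot_for on a dead request finds nothing
theorem slot_for_none (hn : Int) (h0 : hn ≤ 0) :
    ∀ (l cur : List Int), slot_for hn cur l = none := by
  intro l
  induction l with
  | nil => intro cur; rfl
  | cons h t ih =>
    intro cur
    rw [slot_for]
    have hne : ∀ run' : List Int, run' ≠ [] → ¬ ((run'.length : Int) = hn) := by
      intro run' hrun'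
      have : 1 ≤ run'.length := List.length_pos_of_ne_nil hrun' |>.nat_succ_le.trans_eq rfl
      omega
    cases hgl : cur.getLast? with
    | none => simp only [hgl]; rw [if_neg (hne [h] (by simp))]; exact ih _
    | some last =>
      simp only [hgl]
      by_cases hc : h - last = 1
      · simp only [hc, if_true]; rw [if_neg (hne (cur ++ [h]) (by simp))]; exact ih _
      · simp only [hc, if_false]; rw [if_neg (hne [h] (by simp))]; exact ih _

-- B-side: slot_for characterised by the run decomposition
theorem slot_for_spec (hn : Int) :
    ∀ (l cur : List Int), cur ≠ [] → (cur.length : Int) < hn →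
      slot_for hn cur l
        = ((consRun cur l).find? (fun r => decide (hn ≤ (r.length : Int)))).map
            (fun r => r.take hn.toNat) := by
  intro l
  induction l with
  | nil =>
    intro cur hcur hlt
    have : ¬ hn ≤ (cur.length : Int) := by omega
    simp [slot_for, consRun, this]
  | cons h t ih =>
    intro cur hcur hlt
    obtain ⟨last, hgl⟩ : ∃ x, cur.getLast? = some x := by
      cases hx : cur.getLast? with
      | none => exact absurd (List.getLast?_eq_none_iff.mp hx) hcur
      | some x => exact ⟨x, rfl⟩
    rw [slot_for]
    simp only [hgl]
    by_cases hc : h - last = 1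
    · have hcr : consRun cur (h :: t) = consRun (cur ++ [h]) t := by
        simp [consRun, hgl, hc]
      simp only [hc, if_true, hcr]
      by_cases hstop : ((cur ++ [h]).length : Int) = hn
      · rw [if_pos hstop]
        obtain ⟨ext, rs, hhd⟩ := consRun_head t (cur ++ [h])
        have hplen : hn ≤ (((cur ++ [h]) ++ ext).length : Int) := by
          simp only [List.length_append] at *
          push_cast at *
          omega
        have htk : (((cur ++ [h]) ++ ext).take hn.toNat) = cur ++ [h] := by
          have : hn.toNat = (cur ++ [h]).length := by
            simp only [List.length_append] at *
            omega
          rw [this, List.take_left]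
        rw [hhd, List.find?_cons_of_pos (by simpa using hplen)]
        simp only [Option.map_some]
        simpa using htk.symm
      · rw [if_neg hstop]
        exact ih (cur ++ [h]) (by simp) (by simp at hstop ⊢; push_cast at *; omega)
    · have hcr : consRun cur (h :: t) = cur :: consRun [h] t := by
        simp [consRun, hgl, hc]
      have hskip : (fun r => decide (hn ≤ ((r : List Int).length : Int))) cur = false := by
        simp; omega
      have h2 : (1 : Int) < hn := by
        have : 1 ≤ (cur.length : Int) := by
          have := List.length_pos_of_ne_nil hcur
          omega
        omega
      simp only [hc, if_false, hcr, List.find?_cons, hskip]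
      rw [if_neg (by simp; omega)]
      exact ih [h] (by simp) (by simp; omega)

-- the per-day step: A's test-then-rebuild equals B's single scan, for hn ≥ 1
theorem day_core (hn : Int) (h1 : 1 ≤ hn) (hl : List Int) (hne : hn ≤ 1 → hl ≠ [])
    (day : Int) (acc : List (List (Int × List Int))) :
    (if hn ≤ get_maximum_contiguous hl then acc ++ [[(day, get_time_slot hl hn)]] else acc)
    = (match slot_for hn [] hl with
       | some s => acc ++ [[(day, s)]]
       | none => acc) := by
  cases hl with
  | nil =>
    have h2 : 2 ≤ hn := by
      by_contra hlt
      exact (hne (by omega)) rfl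
    have : ¬ hn ≤ get_maximum_contiguous [] := by
      have : get_maximum_contiguous ([] : List Int) = 1 := by decide
      omega
    simp [this, slot_for]
  | cons a t =>
    have hstep : slot_for hn [] (a :: t)
        = if (1 : Int) = hn then some [a] else slot_for hn [a] t := by
      rw [slot_for]
      simp
    by_cases hone : hn = 1
    · subst hone
      rw [if_pos (by rw [gmc_eq_maxLen (a :: t) (by simp)]; exact one_le_maxLenI _)]
      rw [hstep, if_pos rfl]
      simp [get_time_slot]
    · have h2 : 2 ≤ hn := by omega
      have hstep2 : slot_for hn [] (a :: t) = slot_for hn [a] t := by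
        rw [hstep, if_neg (by omega)]
      rw [hstep2, slot_for_spec hn t [a] (by simp) (by simp; omega), consRun_single a t,
        gmc_eq_maxLen (a :: t) (by simp)]
      cases hfind : (runsS (a :: t)).find? (fun r => decide (hn ≤ (r.length : Int))) with
      | none =>
        have : ¬ hn ≤ maxLenI (runsS (a :: t)) := by
          rw [← find?_isSome_iff_maxLen hn h2]
          simp [hfind]
        simp [this]
      | some r =>
        have hcond : hn ≤ maxLenI (runsS (a :: t)) := by
          rw [← find?_isSome_iff_maxLen hn h2]
          simp [hfind]
        rw [if_pos hcond, get_time_slot_eq_ffA hn h2 a t,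
          find?_some_ffA hn (runsS (a :: t)) r hfind]
        simp

-- generic fold helpers for the D_ region
theorem foldl_fixed {α β : Type} (f : α → β → α) (l : List β) (acc : α)
    (h : ∀ a d, d ∈ l → f a d = a) : l.foldl f acc = acc := by
  induction l generalizing acc with
  | nil => rfl
  | cons b t ih =>
    rw [List.foldl_cons, h acc b (by simp)]
    exact ih acc (fun a d hd => h a d (by simp [hd]))

theorem foldl_len_mono {β : Type} (f : List (List (Int × List Int)) → β → List (List (Int × List Int)))
    (hmono : ∀ a d, a.length ≤ (f a d).length) (l : List β) (acc : List (List (Int × List Int))) :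
    acc.length ≤ (l.foldl f acc).length := by
  induction l generalizing acc with
  | nil => exact le_rfl
  | cons b t ih => exact (hmono acc b).trans (ih (f acc b))

theorem foldl_len_strict {β : Type} (f : List (List (Int × List Int)) → β → List (List (Int × List Int)))
    (hmono : ∀ a d, a.length ≤ (f a d).length) (d : β)
    (hstr : ∀ a, a.length < (f a d).length) :
    ∀ (l : List β) (acc : List (List (Int × List Int))), d ∈ l →
      acc.length < (l.foldl f acc).length := by
  intro l
  induction l with
  | nil => intro acc hd; simp at hd
  | cons b t ih =>
    intro acc hd
    rcases List.mem_cons.mp hd with rfl | hd'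
    · exact (hstr acc).trans_le (foldl_len_mono f hmono t (f acc d))
    · exact (hmono acc b).trans_lt (ih (f acc b) hd')

-- ===== VERDICT (by name: the statement is the Claim_ definition above) =====
theorem find_time_slot_spec : Claim_unchanged_find_time_slot := by
  unfold Claim_unchanged_find_time_slot
  intro today offset group_type hours_needed available_time_list _hdom hpre
  unfold Spec_find_time_slot
  intro hD
  unfold find_time_slot find_time_slot_alt
  dsimp only
  by_cases h1 : 1 ≤ hours_needed
  · apply PySem.List.foldl_congr_mem'
    intro day hday acc
    by_cases hw : weekends.contains day
    · simp only [hw, if_true]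
    · obtain ⟨-, -, hne⟩ := hpre day hday (by simpa using hw)
      simp only [hw, Bool.false_eq_true, if_false]
      exact day_core hours_needed h1 _ hne day acc
  · have h0 : hours_needed ≤ 0 := by omega
    have hall : ∀ day ∈ PySem.List.pyRange today (min 31 (today + offset) + 1) 1,
        weekends.contains day = true := by
      intro day hday
      by_contra hw
      exact hD ⟨h0, day, hday, by simpa using hw⟩
    rw [foldl_fixed _ _ _ (fun a d hd => if_pos (hall d hd)),
      foldl_fixed _ _ _ (fun a d hd => if_pos (hall d hd))]

theorem find_time_slot_changed : Claim_changed_find_time_slot := by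
  unfold Claim_changed_find_time_slot
  refine ⟨by decide, by decide, by decide, ?_, by decide, by decide⟩
  have hg : gts_loop [3] 0 [3] 0 = [3] := by rw [gts_loop]; norm_num
  show find_time_slot 1 0 "a" 0 [("a", [(1, [3])])] = [[(1, [3])]]
  have hr : PySem.List.pyRange (1 : Int) 2 1 = [1] := by decide
  have hgm : get_maximum_contiguous [3] = 1 := by decide
  unfold find_time_slot
  simp [hr, weekends, PySem.Dict.getD, PySem.Dict.mk, PySem.Dict.get?, hgm, get_time_slot,
    PySem.List.pyGetD_zero_cons, hg]

theorem find_time_slot_tight : Claim_exact_find_time_slot := by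
  unfold Claim_exact_find_time_slot
  intro today offset group_type hours_needed available_time_list _hdom _hpre hD
  obtain ⟨h0, d, hd, hw⟩ := hD
  have hB : find_time_slot_alt today offset group_type hours_needed available_time_list = [] := by
    unfold find_time_slot_alt
    apply foldl_fixed
    intro a day _hday
    dsimp only
    by_cases hwk : weekends.contains day = true
    · rw [if_pos hwk]
    · rw [if_neg hwk, slot_for_none hours_needed h0]
  have hA : 0 < (find_time_slot today offset group_type hours_needed available_time_list).length := by
    unfold find_time_slot
    dsimp only
    have := foldl_len_strict
      (fun (ret : List (List (Int × List Int))) (day : Int) =>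
        if weekends.contains day then ret
        else
          if hours_needed ≤ get_maximum_contiguous
              (PySem.Dict.getD (PySem.Dict.mk (PySem.Dict.getD (PySem.Dict.mk available_time_list) group_type [])) day []) then
            ret ++ [[(day, get_time_slot
              (PySem.Dict.getD (PySem.Dict.mk (PySem.Dict.getD (PySem.Dict.mk available_time_list) group_type [])) day [])
              hours_needed)]]
          else ret)
      (fun a day => by dsimp only; split_ifs <;> simp) d
      (fun a => by
        dsimp only
        have hle : hours_needed ≤ get_maximum_contiguous
            (PySem.Dict.getD (PySem.Dict.mk (PySem.Dict.getD (PySem.Dict.mk available_time_list) group_type [])) d []) := by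
          have := gmc_ge_one (PySem.Dict.getD (PySem.Dict.mk (PySem.Dict.getD (PySem.Dict.mk available_time_list) group_type [])) d [])
          omega
        rw [if_neg (by rw [hw]; simp), if_pos hle]
        simp)
      (PySem.List.pyRange today (min 31 (today + offset) + 1) 1) [] hd
    simpa using this
  intro heq
  rw [heq, hB] at hA
  simp at hA
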